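-- pv_equiv track=rewrite | github.com/HLammers/cybo-drummer | src/ui_page_tools.py | _shift_series
-- ===== SOURCE A (Python) =====
-- def _shift_series(series, shift: int, nr_pads: int):
--     '''shifts series to start with a different note than the base note; called by self._identify_multi_parameters and
--     self._set_multi_series'''
--     shifted_series = list(series)
--     if shift > 0:
--         shifted_series = [x - 12 for x in series[-shift:]] + shifted_series
--     elif shift < 0:
--         shifted_series = shifted_series[-shift:]
--     n = 1
--     while len(shifted_series) < nr_pads:
--         shifted_series = shifted_series + [x + n * 12 for x in series]
--         n += 1
--     if nr_pads < len(shifted_series):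
--         shifted_series = shifted_series[:nr_pads]
--     return shifted_series
-- ===== SOURCE B (Python) =====
-- def _shift_series(series, shift: int, nr_pads: int):
--     '''Same result as A; instead of growing the list one octave at a time and
--     truncating, compute the exact number of full and partial octaves with divmod
--     and build the tail in one go.'''
--     series = list(series)
--     if shift > 0:
--         head = [x - 12 for x in series[-shift:]] + series
--     elif shift < 0:
--         head = series[-shift:]
--     else:
--         head = series
--     if nr_pads <= len(head):
--         return head[:nr_pads]
--     q, r = divmod(nr_pads - len(head), len(series))
--     tail = [x + n * 12 for n in range(1, q + 1) for x in series]
--     tail += [x + (q + 1) * 12 for x in series[:r]]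
--     return head + tail
-- ===== Notes on version B (the rewrite author's own statement) =====
-- stated objective: alternative
-- what changed: A repeatedly appends whole shifted octaves in a while-loop until the list is long enough and then truncates; B computes the exact number of full and partial octaves needed with divmod and builds the tail of exactly the right length in one go, with no over-building or final truncation in the tiling case.
import Mathlib
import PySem

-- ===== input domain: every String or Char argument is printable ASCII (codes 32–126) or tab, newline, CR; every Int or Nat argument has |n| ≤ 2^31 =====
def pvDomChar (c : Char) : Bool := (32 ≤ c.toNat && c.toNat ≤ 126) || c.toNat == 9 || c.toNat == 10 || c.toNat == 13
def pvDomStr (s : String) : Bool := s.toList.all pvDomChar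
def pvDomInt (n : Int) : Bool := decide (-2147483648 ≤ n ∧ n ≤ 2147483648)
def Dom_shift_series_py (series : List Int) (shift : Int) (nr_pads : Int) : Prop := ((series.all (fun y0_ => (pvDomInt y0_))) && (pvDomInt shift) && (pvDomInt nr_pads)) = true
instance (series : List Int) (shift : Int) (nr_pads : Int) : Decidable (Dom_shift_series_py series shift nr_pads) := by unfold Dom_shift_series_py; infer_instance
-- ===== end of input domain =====

-- B replaces A's grow-and-truncate while-loop by a divmod computation of the exact
-- number of full and partial octaves (objective: alternative decomposition, same cost).


-- ===== PORT A =====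
-- the Python while-loop; fuel only makes it total (unused iterations change nothing)
def shiftALoop (series : List Int) (nr_pads : Int) : List Int → Int → Nat → List Int
  | cur, _, 0 => cur
  | cur, n, fuel+1 =>
      if (cur.length : Int) < nr_pads then
        shiftALoop series nr_pads (cur ++ series.map (fun x => x + n * 12)) (n + 1) fuel
      else cur

def shift_series_py (series : List Int) (shift : Int) (nr_pads : Int) : List Int :=
  let shifted := series
  let shifted :=
    if shift > 0 then
      (PySem.List.slice series (some (-shift)) none).map (fun x => x - 12) ++ shifted
    else if shift < 0 then PySem.List.slice shifted (some (-shift)) none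
    else shifted
  let shifted := shiftALoop series nr_pads shifted 1 (nr_pads.toNat + 1)
  if nr_pads < (shifted.length : Int) then PySem.List.slice shifted none (some nr_pads)
  else shifted

-- ===== PORT B =====
def shift_series_py_alt (series : List Int) (shift : Int) (nr_pads : Int) : List Int :=
  let head :=
    if shift > 0 then
      (PySem.List.slice series (some (-shift)) none).map (fun x => x - 12) ++ series
    else if shift < 0 then PySem.List.slice series (some (-shift)) none
    else series
  if nr_pads ≤ (head.length : Int) then PySem.List.slice head none (some nr_pads)
  else
    match PySem.Int.divmod? (nr_pads - head.length) (series.length : Int) with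
    | none => head  -- Python raises ZeroDivisionError here; excluded by Pre_
    | some (q, r) =>
        let tail := (PySem.List.pyRange 1 (q + 1) 1).flatMap
          (fun n => series.map (fun x => x + n * 12))
        let tail := tail ++ (PySem.List.slice series none (some r)).map
          (fun x => x + (q + 1) * 12)
        head ++ tail

-- ===== PRECONDITION & SPEC =====
-- Pre_ excludes only the inputs on which A never returns: with an empty series and
-- nr_pads > 0 the while-loop adds nothing and loops forever (B raises ZeroDivisionError).
def Pre_shift_series_py (series : List Int) (shift : Int) (nr_pads : Int) : Prop :=
  series ≠ [] ∨ nr_pads ≤ 0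
instance (series : List Int) (shift : Int) (nr_pads : Int) : Decidable (Pre_shift_series_py series shift nr_pads) := by unfold Pre_shift_series_py; infer_instance

def pvWitness_shift_series_py : List Int × Int × Int := ([60, 62, 64], 2, 10)

def Spec_shift_series_py (series : List Int) (shift : Int) (nr_pads : Int) (out : List Int) : Prop := out = shift_series_py_alt series shift nr_pads
instance (series : List Int) (shift : Int) (nr_pads : Int) (out : List Int) : Decidable (Spec_shift_series_py series shift nr_pads out) := by unfold Spec_shift_series_py; infer_instance

-- ===== CLAIM (what is proved, stated in full; the proofs are below) =====
def Claim_equal_shift_series_py : Prop := ∀ (series : List Int) (shift : Int) (nr_pads : Int), Dom_shift_series_py series shift nr_pads → Pre_shift_series_py series shift nr_pads → Spec_shift_series_py series shift nr_pads (shift_series_py series shift nr_pads)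

-- ===== LEMMAS AND PROOFS =====

-- concatenation of m consecutive octave copies starting at octave n (proof-only)
def pvOctSeg (s : List Int) : Int → Nat → List Int
  | _, 0 => []
  | n, m + 1 => s.map (fun x => x + n * 12) ++ pvOctSeg s (n + 1) m

theorem pvOctSeg_length (s : List Int) (n : Int) (m : Nat) :
    (pvOctSeg s n m).length = m * s.length := by
  induction m generalizing n with
  | zero => simp [pvOctSeg]
  | succ m ih => simp [pvOctSeg, ih, Nat.succ_mul]; ring

theorem pvOctSeg_snoc (s : List Int) (n : Int) (m : Nat) :
    pvOctSeg s n (m + 1) = pvOctSeg s n m ++ s.map (fun x => x + (n + m) * 12) := by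
  induction m generalizing n with
  | zero => simp [pvOctSeg]
  | succ m ih =>
      rw [show m + 1 + 1 = (m + 1) + 1 from rfl, pvOctSeg]
      rw [ih (n + 1), pvOctSeg]
      simp [List.append_assoc]
      exact fun a _ => by ring

theorem shiftALoop_spec (series : List Int) (nr_pads : Int) (m : Nat) :
    ∀ (cur : List Int) (n : Int) (fuel : Nat),
      nr_pads ≤ (cur.length : Int) + (m : Int) * series.length →
      (∀ j : Nat, j < m → (cur.length : Int) + (j : Int) * series.length < nr_pads) →
      m ≤ fuel →
      shiftALoop series nr_pads cur n fuel = cur ++ pvOctSeg series n m := by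
  induction m with
  | zero =>
      intro cur n fuel h1 _ _
      simp only [Nat.cast_zero, zero_mul, add_zero] at h1
      cases fuel with
      | zero => simp [shiftALoop, pvOctSeg]
      | succ f => simp [shiftALoop, pvOctSeg, not_lt.mpr h1]
  | succ m ih =>
      intro cur n fuel h1 h2 hf
      have h0 : (cur.length : Int) < nr_pads := by
        have := h2 0 (Nat.succ_pos m); simpa using this
      cases fuel with
      | zero => omega
      | succ f =>
          simp only [shiftALoop, h0, if_pos]
          rw [ih (cur ++ series.map (fun x => x + n * 12)) (n + 1) f]
          · simp [pvOctSeg, List.append_assoc]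
          · simp only [List.length_append, List.length_map]
            push_cast
            push_cast at h1
            linarith
          · intro j hj
            have := h2 (j + 1) (by omega)
            simp only [List.length_append, List.length_map]
            push_cast
            push_cast at this
            linarith
          · omega

-- tail built with pyRange equals pvOctSeg
theorem pyRange_flatMap_octSeg (s : List Int) (q : Nat) :
    ∀ start : Int,
    (PySem.List.pyRange start (start + q) 1).flatMap (fun n => s.map (fun x => x + n * 12))
      = pvOctSeg s start q := by
  induction q with
  | zero => intro start; simp [pvOctSeg, PySem.List.pyRange]
  | succ q ih =>
      intro start
      rw [PySem.List.pyRange_one_cons (by omega : start < start + (q + 1 : Nat))]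
      have : start + ((q : Int) + 1) = (start + 1) + q := by ring
      push_cast
      rw [this]
      simp only [List.flatMap_cons]
      rw [show ((PySem.List.pyRange (start + 1) (start + 1 + q) 1).flatMap
            (fun n => s.map (fun x => x + n * 12))) = pvOctSeg s (start + 1) q from by
        have := ih (start + 1); push_cast at this ⊢; exact this]
      rfl

theorem shift_series_py_spec' :
    ∀ (series : List Int) (shift : Int) (nr_pads : Int),
      Pre_shift_series_py series shift nr_pads →
      shift_series_py series shift nr_pads = shift_series_py_alt series shift nr_pads := by
  intro series shift nr_pads hpre
  simp only [shift_series_py, shift_series_py_alt]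
  set hd : List Int :=
    (if shift > 0 then
      (PySem.List.slice series (some (-shift)) none).map (fun x => x - 12) ++ series
    else if shift < 0 then PySem.List.slice series (some (-shift)) none
    else series) with hhd
  by_cases hcase : nr_pads ≤ (hd.length : Int)
  · -- no tiling needed
    rw [shiftALoop_spec series nr_pads 0 hd 1 (nr_pads.toNat + 1)
        (by simpa using hcase) (by omega) (by omega)]
    simp only [pvOctSeg, List.append_nil, if_pos hcase]
    by_cases hlt : nr_pads < (hd.length : Int)
    · rw [if_pos hlt]
    · rw [if_neg hlt]
      have hnn : 0 ≤ nr_pads := by omega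
      rw [PySem.List.slice_to hd hnn]
      have : hd.length ≤ nr_pads.toNat := by omega
      exact (List.take_of_length_le this).symm
  · -- tiling: series is nonempty
    rw [not_le] at hcase
    have hsne : series ≠ [] := by
      rcases hpre with h | h
      · exact h
      · exact absurd h (by omega)
    have hL : 0 < (series.length : Int) := by
      cases series with
      | nil => exact absurd rfl hsne
      | cons a l => simp
    set L : Int := (series.length : Int) with hLdef
    set k : Int := nr_pads - (hd.length : Int) with hkdef
    have hk0 : 0 < k := by omega
    set q : Int := PySem.Int.floordiv k L with hqdef
    set r : Int := PySem.Int.mod k L with hrdef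
    have hdm : PySem.Int.divmod? (nr_pads - (hd.length : Int)) L = some (q, r) := by
      simp only [PySem.Int.divmod?, if_neg (show ¬L = 0 by omega)]
      rfl
    have hr0 : 0 ≤ r := PySem.Int.mod_nonneg k hL
    have hrL : r < L := PySem.Int.mod_lt k hL
    have hqr : q * L + r = k := PySem.Int.floordiv_mul_add_mod k L
    have hq0 : 0 ≤ q := by
      rw [hqdef, PySem.Int.le_floordiv_iff_mul_le hL]
      omega
    set qn : Nat := q.toNat with hqndef
    have hqcast : (qn : Int) = q := Int.toNat_of_nonneg hq0
    set rn : Nat := r.toNat with hrndef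
    have hrcast : (rn : Int) = r := Int.toNat_of_nonneg hr0
    set m : Nat := if r = 0 then qn else qn + 1 with hmdef
    have hqr' : (qn : Int) * L + r = k := by rw [hqcast]; exact hqr
    have hmL : (m : Int) * L = if r = 0 then k else k - r + L := by
      rcases eq_or_ne r 0 with h | h
      · rw [if_pos h]
        have hmq : (m : Int) = qn := by rw [hmdef, if_pos h]
        rw [hmq]; omega
      · rw [if_neg h]
        have hmq : (m : Int) = (qn : Int) + 1 := by rw [hmdef, if_neg h]; push_cast; ring
        rw [hmq, add_mul, one_mul]; omega
    have hm1 : nr_pads ≤ (hd.length : Int) + (m : Int) * L := by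
      rcases eq_or_ne r 0 with h | h
      · rw [hmL, if_pos h]; omega
      · rw [hmL, if_neg h]; omega
    have hmlt : (m : Int) * L - L < k := by
      rcases eq_or_ne r 0 with h | h
      · rw [hmL, if_pos h]; omega
      · rw [hmL, if_neg h]; omega
    have hm2 : ∀ j : Nat, j < m → (hd.length : Int) + (j : Int) * L < nr_pads := by
      intro j hj
      have hj1 : (j : Int) ≤ (m : Int) - 1 := by omega
      have h2 : (j : Int) * L ≤ ((m : Int) - 1) * L :=
        mul_le_mul_of_nonneg_right hj1 (le_of_lt hL)
      have h3 : ((m : Int) - 1) * L = (m : Int) * L - L := by ring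
      omega
    have hm3 : m ≤ nr_pads.toNat + 1 := by
      rcases Nat.eq_zero_or_pos m with h | h
      · omega
      · have h1 : ((m : Int) - 1) ≤ ((m : Int) - 1) * L :=
          le_mul_of_one_le_right (by omega) (by omega)
        have h3 : ((m : Int) - 1) * L = (m : Int) * L - L := by ring
        omega
    rw [shiftALoop_spec series nr_pads m hd 1 (nr_pads.toNat + 1) hm1 hm2 hm3]
    rw [if_neg (not_le.mpr hcase), hdm]
    simp only []
    have hlen : ((hd ++ pvOctSeg series 1 m).length : Int) = (hd.length : Int) + (m : Int) * L := by
      rw [List.length_append, pvOctSeg_length]; push_cast; ring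
    have hrange : (PySem.List.pyRange 1 (q + 1) 1).flatMap
        (fun n => series.map (fun x => x + n * 12)) = pvOctSeg series 1 qn := by
      have h := pyRange_flatMap_octSeg series qn 1
      rw [show (1 : Int) + (qn : Int) = q + 1 by omega] at h
      exact h
    rcases eq_or_ne r 0 with h | h
    · -- exact fit: no truncation on either side
      have hcond : ¬ nr_pads < ((hd ++ pvOctSeg series 1 m).length : Int) := by
        rw [hlen]
        have := hmL; rw [if_pos h] at this
        omega
      rw [if_neg hcond]
      have hm' : m = qn := by rw [hmdef, if_pos h]
      rw [hm', hrange, h, PySem.List.slice_to series (le_refl 0)]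
      simp
    · -- partial last octave
      have hmL' : (m : Int) * L = k - r + L := by rw [hmL, if_neg h]
      have hcond : nr_pads < ((hd ++ pvOctSeg series 1 m).length : Int) := by
        rw [hlen]; omega
      rw [if_pos hcond]
      have hnn : (0 : Int) ≤ nr_pads := by omega
      rw [PySem.List.slice_to _ hnn]
      have hm' : m = qn + 1 := by rw [hmdef, if_neg h]
      rw [hm', pvOctSeg_snoc, List.take_append]
      have h1 : List.take nr_pads.toNat hd = hd := List.take_of_length_le (by omega)
      rw [h1, List.take_append]
      have hNc : ((qn * series.length : Nat) : Int) = (qn : Int) * L := by push_cast; rfl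
      have hkN : nr_pads.toNat - hd.length = qn * series.length + rn := by omega
      rw [hkN]
      have hto : (pvOctSeg series 1 qn).length ≤ qn * series.length + rn := by
        rw [pvOctSeg_length]; omega
      rw [List.take_of_length_le hto, pvOctSeg_length, Nat.add_sub_cancel_left]
      rw [hrange, PySem.List.slice_to series hr0]
      rw [show r.toNat = rn from rfl, List.map_take]
      rw [show (1 : Int) + (qn : Int) = q + 1 by omega]

-- ===== VERDICT (by name: the statement is the Claim_ definition above) =====
theorem shift_series_py_spec : Claim_equal_shift_series_py := by
  intro series shift nr_pads _ hpre
  exact shift_series_py_spec' series shift nr_pads hpre
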